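-- pv_equiv track=rewrite | github.com/amyhuangtuzi/algorithms | findNumOfPairs.py | findNumOfPairs
-- ===== SOURCE A (Python) =====
-- def findNumOfPairs(a, b):
--     a.sort()
--     b.sort()
--     i, j = 0, 0
--     cnt = 0
--     while i < len(a) and j < len(b):
--         if a[i] > b[j]:
--             cnt += 1
--             i += 1
--             j += 1
--         else:
--             i += 1
--     return cnt
-- ===== SOURCE B (Python) =====
-- def findNumOfPairs(a, b):
--     # descending balance sweep: sorts a and b in place (same side effect as A),
--     # then walks b from its largest value down, absorbing into `avail` every
--     # a-value strictly greater than the current b-value; a b-value is counted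
--     # as a pair exactly when an absorbed a-value is still available.
--     a.sort()
--     b.sort()
--     avail = 0
--     cnt = 0
--     i = len(a) - 1
--     for j in range(len(b) - 1, -1, -1):
--         while i >= 0 and a[i] > b[j]:
--             avail += 1
--             i -= 1
--         if avail > 0:
--             cnt += 1
--             avail -= 1
--     return cnt
-- ===== Notes on version B (the rewrite author's own statement) =====
-- stated objective: alternative
-- what changed: Replaces A's ascending two-pointer greedy matching by a descending balance-counter sweep: walk b from its largest value down, absorb every strictly larger a-value into an availability counter, and count a pair whenever an absorbed a-value is available.
import Mathlib
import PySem

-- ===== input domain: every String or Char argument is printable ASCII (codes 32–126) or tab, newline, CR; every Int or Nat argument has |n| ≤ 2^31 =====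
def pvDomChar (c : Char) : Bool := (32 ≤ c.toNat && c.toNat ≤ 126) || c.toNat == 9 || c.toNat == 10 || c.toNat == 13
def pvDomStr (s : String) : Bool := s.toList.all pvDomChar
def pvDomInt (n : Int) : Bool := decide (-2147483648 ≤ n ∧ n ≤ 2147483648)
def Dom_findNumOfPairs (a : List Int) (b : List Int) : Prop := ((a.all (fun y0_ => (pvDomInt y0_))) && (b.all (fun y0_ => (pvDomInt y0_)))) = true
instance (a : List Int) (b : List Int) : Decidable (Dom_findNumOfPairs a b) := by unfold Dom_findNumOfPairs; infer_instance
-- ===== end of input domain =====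

-- B replaces A's ascending two-pointer matching by a descending balance-counter sweep
-- (alternative decomposition, same O(n log n) cost). Both Pythons sort a and b in place;
-- the equivalence proved here is about the RETURN value (B performs the same mutation).

-- ===== PORT A =====
-- while i < len(a) and j < len(b): …  — recursion on the loop state (i, j, cnt);
-- a[i] / b[j] are always in range inside the guard, so getD is exact here.
def pvLoopA (sa sb : List Int) (i j : Nat) (cnt : Int) : Int :=
  if h : i < sa.length ∧ j < sb.length then
    if sa.getD i 0 > sb.getD j 0 then pvLoopA sa sb (i + 1) (j + 1) (cnt + 1)
    else pvLoopA sa sb (i + 1) j cnt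
  else cnt
termination_by sa.length - i
decreasing_by all_goals omega

def findNumOfPairs (a : List Int) (b : List Int) : Int :=
  let a := PySem.List.sorted a (fun x => x)
  let b := PySem.List.sorted b (fun x => x)
  pvLoopA a b 0 0 0

-- ===== PORT B =====
-- inner `while i >= 0 and a[i] > b[j]` over the descending a-stream:
def pvAbsorbB (bj : Int) : List Int → Int → List Int × Int
  | [], avail => ([], avail)
  | x :: xs, avail => if x > bj then pvAbsorbB bj xs (avail + 1) else (x :: xs, avail)

-- outer `for j in range(len(b)-1, -1, -1)` over the descending b-stream:
def pvLoopB : List Int → List Int → Int → Int → Int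
  | _, [], _, cnt => cnt
  | ra, y :: ys, avail, cnt =>
    let p := pvAbsorbB y ra avail
    if p.2 > 0 then pvLoopB p.1 ys (p.2 - 1) (cnt + 1)
    else pvLoopB p.1 ys p.2 cnt

def findNumOfPairs_alt (a : List Int) (b : List Int) : Int :=
  let a := PySem.List.sorted a (fun x => x)
  let b := PySem.List.sorted b (fun x => x)
  pvLoopB a.reverse b.reverse 0 0

-- ===== PRECONDITION & SPEC =====
def Spec_findNumOfPairs (a : List Int) (b : List Int) (out : Int) : Prop := out = findNumOfPairs_alt a b
instance (a : List Int) (b : List Int) (out : Int) : Decidable (Spec_findNumOfPairs a b out) := by unfold Spec_findNumOfPairs; infer_instance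

-- ===== CLAIM (what is proved, stated in full; the proofs are below) =====
def Claim_equal_findNumOfPairs : Prop := ∀ (a : List Int) (b : List Int), Dom_findNumOfPairs a b → Spec_findNumOfPairs a b (findNumOfPairs a b)

-- ===== LEMMAS AND PROOFS =====

-- Clean Nat-valued form of A's loop: structural two-pointer on ascending lists.
def pvMatchUp : List Int → List Int → Nat
  | [], _ => 0
  | _ :: _, [] => 0
  | x :: xs, y :: ys => if x > y then pvMatchUp xs ys + 1 else pvMatchUp xs (y :: ys)

-- Clean Nat-valued form of B's sweep on descending lists.
def pvSwp : List Int → List Int → Nat → Nat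
  | _, [], _ => 0
  | ra, y :: ys, av =>
    let k := (ra.takeWhile (fun x => decide (y < x))).length
    let ra' := ra.dropWhile (fun x => decide (y < x))
    if av + k > 0 then pvSwp ra' ys (av + k - 1) + 1 else pvSwp ra' ys (av + k)

theorem pvMatchUp_nil_right (xs : List Int) : pvMatchUp xs [] = 0 := by
  cases xs <;> simp [pvMatchUp]

-- Bridge: A's index loop computes pvMatchUp of the remaining suffixes.
theorem pvLoopA_eq (sa sb : List Int) :
    ∀ i j cnt, pvLoopA sa sb i j cnt = cnt + (pvMatchUp (sa.drop i) (sb.drop j) : Int) := by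
  intro i
  induction hn : sa.length - i using Nat.strong_induction_on generalizing i with
  | _ n ih =>
    intro j cnt
    rw [pvLoopA]
    by_cases h : i < sa.length ∧ j < sb.length
    · obtain ⟨hi, hj⟩ := h
      rw [List.drop_eq_getElem_cons hi, List.drop_eq_getElem_cons hj]
      rw [dif_pos ⟨hi, hj⟩, List.getD_eq_getElem sa 0 hi, List.getD_eq_getElem sb 0 hj]
      by_cases hc : sa[i] > sb[j]
      · rw [if_pos hc, ih (sa.length - (i + 1)) (by omega) (i + 1) rfl]
        simp [pvMatchUp, hc]; ring
      · rw [if_neg hc, ih (sa.length - (i + 1)) (by omega) (i + 1) rfl]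
        rw [List.drop_eq_getElem_cons hj]
        simp [pvMatchUp, hc]
    · rw [dif_neg h]
      rcases not_and_or.mp h with h1 | h1
      · rw [List.drop_eq_nil_of_le (by omega)]; simp [pvMatchUp]
      · rw [show sb.drop j = [] from List.drop_eq_nil_of_le (by omega), pvMatchUp_nil_right]; simp

-- Bridge: the inner while of B is takeWhile/dropWhile.
theorem pvAbsorbB_eq (bj : Int) (xs : List Int) : ∀ avail,
    pvAbsorbB bj xs avail =
      (xs.dropWhile (fun x => decide (bj < x)),
       avail + ((xs.takeWhile (fun x => decide (bj < x))).length : Int)) := by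
  induction xs with
  | nil => intro avail; simp [pvAbsorbB]
  | cons x xs ih =>
    intro avail
    by_cases h : bj < x
    · simp [pvAbsorbB, h, ih]; ring
    · simp [pvAbsorbB, h]

-- Bridge: B's loop computes pvSwp.
theorem pvLoopB_eq (ys : List Int) : ∀ (ra : List Int) (av : Nat) (cnt : Int),
    pvLoopB ra ys (av : Int) cnt = cnt + (pvSwp ra ys av : Int) := by
  induction ys with
  | nil => intro ra av cnt; simp [pvLoopB, pvSwp]
  | cons y ys ih =>
    intro ra av cnt
    rw [pvLoopB, pvAbsorbB_eq]
    by_cases h : 0 < av + (ra.takeWhile (fun x => decide (y < x))).length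
    · rw [if_pos (by omega)]
      have h1 : ((av : Int) + ((ra.takeWhile (fun x => decide (y < x))).length : Int)) - 1
          = ((av + (ra.takeWhile (fun x => decide (y < x))).length - 1 : Nat) : Int) := by
        omega
      rw [h1, ih]
      simp only [pvSwp]
      rw [if_pos h]
      push_cast; ring
    · rw [if_neg (by push_cast; omega)]
      have h1 : ((av : Int) + ((ra.takeWhile (fun x => decide (y < x))).length : Int))
          = ((av + (ra.takeWhile (fun x => decide (y < x))).length : Nat) : Int) := by push_cast; ring
      rw [h1, ih]
      simp only [pvSwp]
      rw [if_neg h]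

theorem pvSwp_le (ys : List Int) : ∀ ra av, pvSwp ra ys av ≤ ys.length := by
  induction ys with
  | nil => intro ra av; simp [pvSwp]
  | cons y ys ih =>
    intro ra av
    simp only [pvSwp]
    split
    · exact Nat.succ_le_succ (ih _ _)
    · exact (ih _ _).trans (Nat.le_succ _)

theorem pvSwp_nil_left (ys : List Int) : pvSwp [] ys 0 = 0 := by
  induction ys with
  | nil => simp [pvSwp]
  | cons y ys ih => simpa [pvSwp] using ih

-- one extra unit of avail raises the sweep count by one, capped by the number of b's left
theorem pvSwp_credit (ys : List Int) : ∀ ra av,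
    pvSwp ra ys (av + 1) = min (pvSwp ra ys av + 1) ys.length := by
  induction ys with
  | nil => intro ra av; simp [pvSwp]
  | cons y ys ih =>
    intro ra av
    simp only [pvSwp]
    by_cases h : 0 < av + (ra.takeWhile (fun x => decide (y < x))).length
    · rw [if_pos (by omega), if_pos h]
      have e1 : av + 1 + (ra.takeWhile (fun x => decide (y < x))).length - 1
          = (av + (ra.takeWhile (fun x => decide (y < x))).length - 1) + 1 := by omega
      rw [e1, ih]
      have := pvSwp_le ys (ra.dropWhile (fun x => decide (y < x)))
        (av + (ra.takeWhile (fun x => decide (y < x))).length - 1)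
      simp only [List.length_cons]
      omega
    · rw [if_pos (by omega), if_neg h]
      have e1 : av + 1 + (ra.takeWhile (fun x => decide (y < x))).length - 1
          = av + (ra.takeWhile (fun x => decide (y < x))).length := by omega
      rw [e1]
      have := pvSwp_le ys (ra.dropWhile (fun x => decide (y < x)))
        (av + (ra.takeWhile (fun x => decide (y < x))).length)
      simp only [List.length_cons]
      omega

-- an a-value above the current (= largest remaining) b-value is absorbed into avail
theorem pvSwp_cons_a (x y : Int) (ra ys : List Int) (h : y < x) (av : Nat) :
    pvSwp (x :: ra) (y :: ys) av = pvSwp ra (y :: ys) (av + 1) := by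
  have hd : decide (y < x) = true := by simpa using h
  simp only [pvSwp, List.takeWhile_cons, List.dropWhile_cons, hd, if_true, List.length_cons]
  have e1 : av + ((ra.takeWhile (fun x => decide (y < x))).length + 1)
      = av + 1 + (ra.takeWhile (fun x => decide (y < x))).length := by omega
  rw [e1]

-- a b-value not exceeded by any remaining a-value is skipped by the sweep (at avail 0)
theorem pvSwp_cons_b (y : Int) (ra ys : List Int) (h : ∀ x ∈ ra, x ≤ y) :
    pvSwp ra (y :: ys) 0 = pvSwp ra ys 0 := by
  cases ra with
  | nil => simp [pvSwp]
  | cons x ra =>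
    have hx : ¬ (y < x) := by have := h x (by simp); omega
    simp [pvSwp, hx]

-- appending a value larger than every b to the a-list adds one match, capped by |bs|
theorem pvMatchUp_append_max (x : Int) : ∀ (as bs : List Int), (∀ b ∈ bs, b < x) →
    pvMatchUp (as ++ [x]) bs = min (pvMatchUp as bs + 1) bs.length := by
  intro as
  induction as with
  | nil =>
    intro bs h
    cases bs with
    | nil => simp [pvMatchUp]
    | cons y ys =>
      have hy : y < x := h y (by simp)
      simp only [List.nil_append, pvMatchUp, if_pos hy, List.length_cons]
      omega
  | cons a as ih =>
    intro bs h
    cases bs with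
    | nil => simp [pvMatchUp_nil_right, pvMatchUp]
    | cons y ys =>
      simp only [List.cons_append, pvMatchUp]
      by_cases hc : a > y
      · rw [if_pos hc, if_pos hc, ih ys (fun b hb => h b (by simp [hb]))]
        simp only [List.length_cons]
        omega
      · rw [if_neg hc, if_neg hc, ih (y :: ys) h]

-- appending a value at least every a to the b-list changes nothing
theorem pvMatchUp_append_irrelevant (y : Int) : ∀ (as bs : List Int), (∀ a ∈ as, a ≤ y) →
    pvMatchUp as (bs ++ [y]) = pvMatchUp as bs := by
  intro as
  induction as with
  | nil => intro bs _; simp [pvMatchUp]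
  | cons a as ih =>
    intro bs h
    cases bs with
    | nil =>
      have ha : ¬ (a > y) := by have := h a (by simp); omega
      simp only [List.nil_append, pvMatchUp, ha, pvMatchUp_nil_right]
      have : pvMatchUp as [y] = pvMatchUp as ([] ++ [y]) := by simp
      rw [this, ih [] (fun a' ha' => h a' (by simp [ha']))]
      simp [pvMatchUp_nil_right]
    | cons b bs' =>
      simp only [List.cons_append, pvMatchUp]
      by_cases hc : a > b
      · rw [if_pos hc, if_pos hc, ih bs' (fun a' ha' => h a' (by simp [ha']))]
      · rw [if_neg hc, if_neg hc]
        have h2 := ih (b :: bs') (fun a' ha' => h a' (by simp [ha']))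
        simpa using h2

-- MAIN: on descending lists, the ascending two-pointer count equals the balance sweep.
theorem pvMain : ∀ (ra rb : List Int),
    ra.Pairwise (fun p q => q ≤ p) → rb.Pairwise (fun p q => q ≤ p) →
    pvMatchUp ra.reverse rb.reverse = pvSwp ra rb 0 := by
  intro ra
  induction ra with
  | nil => intro rb _ _; simp [pvMatchUp, pvSwp_nil_left]
  | cons x ras ih1 =>
    intro rb hra hrb
    induction rb with
    | nil => simp [pvMatchUp_nil_right, pvSwp]
    | cons y rbs ih2 =>
      rw [List.pairwise_cons] at hrb
      by_cases hxy : y < x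
      · -- x is strictly the largest element: matches the credit lemma
        have hball : ∀ b ∈ (y :: rbs).reverse, b < x := by
          intro b hb
          rw [List.mem_reverse] at hb
          rcases List.mem_cons.mp hb with rfl | hb
          · omega
          · have := hrb.1 b hb; omega
        rw [show (x :: ras).reverse = ras.reverse ++ [x] by simp,
            pvMatchUp_append_max x ras.reverse (y :: rbs).reverse hball,
            ih1 (y :: rbs) (List.Pairwise.of_cons hra) (List.pairwise_cons.mpr hrb),
            pvSwp_cons_a x y ras rbs hxy, pvSwp_credit]
        simp
      · -- y is at least every remaining a-value: both sides ignore it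
        have haall : ∀ a' ∈ (x :: ras), a' ≤ y := by
          intro a' ha'
          rcases List.mem_cons.mp ha' with rfl | ha'
          · omega
          · have := (List.pairwise_cons.mp hra).1 a' ha'; omega
        rw [show (y :: rbs).reverse = rbs.reverse ++ [y] by simp,
            pvMatchUp_append_irrelevant y (x :: ras).reverse rbs.reverse
              (fun a' ha' => haall a' (List.mem_reverse.mp ha')),
            ih2 hrb.2, pvSwp_cons_b y (x :: ras) rbs haall]

-- ===== VERDICT (by name: the statement is the Claim_ definition above) =====
theorem findNumOfPairs_spec : Claim_equal_findNumOfPairs := by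
  intro a b _
  unfold Spec_findNumOfPairs findNumOfPairs findNumOfPairs_alt
  simp only []
  set sa := PySem.List.sorted a (fun x => x) with hsa
  set sb := PySem.List.sorted b (fun x => x) with hsb
  have hA : pvLoopA sa sb 0 0 0 = ((pvMatchUp sa sb : Nat) : Int) := by
    rw [pvLoopA_eq sa sb 0 0 0]; simp
  have hB : pvLoopB sa.reverse sb.reverse 0 0 = ((pvSwp sa.reverse sb.reverse 0 : Nat) : Int) := by
    have := pvLoopB_eq sb.reverse sa.reverse 0 0
    simpa using this
  rw [hA, hB]
  have hm : pvMatchUp sa.reverse.reverse sb.reverse.reverse = pvSwp sa.reverse sb.reverse 0 := by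
    apply pvMain
    · rw [List.pairwise_reverse]
      exact PySem.List.sorted_pairwise a (fun x => x)
    · rw [List.pairwise_reverse]
      exact PySem.List.sorted_pairwise b (fun x => x)
  simp only [List.reverse_reverse] at hm
  rw [hm]
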